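-- pv_equiv track=rewrite | github.com/AnnAngela/pypi-package-changelog-generator | src/pypi_package_changelog_generator/metadata_analysis.py | compare_dependencies
-- ===== SOURCE A (Python) =====
-- from typing import Any
--
-- def compare_dependencies(
--     before: dict[str, str], after: dict[str, str]
-- ) -> list[dict[str, Any]]:
--     changes: list[dict[str, Any]] = []
--     before_keys = set(before)
--     after_keys = set(after)
--     for name in sorted(before_keys - after_keys):
--         changes.append(
--             {"kind": "removed", "name": name, "before": before[name], "after": None}
--         )
--     for name in sorted(after_keys - before_keys):
--         changes.append(
--             {"kind": "added", "name": name, "before": None, "after": after[name]}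
--         )
--     for name in sorted(before_keys & after_keys):
--         if before[name] == after[name]:
--             continue
--         changes.append(
--             {
--                 "kind": "changed",
--                 "name": name,
--                 "before": before[name],
--                 "after": after[name],
--             }
--         )
--     return changes
-- ===== SOURCE B (Python) =====
-- def compare_dependencies(before, after):
--     removed, added, changed = [], [], []
--     for name in sorted(set(before) | set(after)):
--         if name not in after:
--             removed.append(
--                 {"kind": "removed", "name": name, "before": before[name], "after": None}
--             )
--         elif name not in before:
--             added.append(
--                 {"kind": "added", "name": name, "before": None, "after": after[name]}
--             )
--         elif before[name] != after[name]:
--             changed.append(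
--                 {
--                     "kind": "changed",
--                     "name": name,
--                     "before": before[name],
--                     "after": after[name],
--                 }
--             )
--     return removed + added + changed
-- ===== Notes on version B (the rewrite author's own statement) =====
-- stated objective: simpler
-- what changed: Replaces A's three passes over separately computed, separately sorted key sets (difference, reverse difference, intersection) with a single pass over the sorted union of all keys that classifies each key into one of three buckets (removed/added/changed) by membership tests, returning the concatenated buckets.
import Mathlib
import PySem

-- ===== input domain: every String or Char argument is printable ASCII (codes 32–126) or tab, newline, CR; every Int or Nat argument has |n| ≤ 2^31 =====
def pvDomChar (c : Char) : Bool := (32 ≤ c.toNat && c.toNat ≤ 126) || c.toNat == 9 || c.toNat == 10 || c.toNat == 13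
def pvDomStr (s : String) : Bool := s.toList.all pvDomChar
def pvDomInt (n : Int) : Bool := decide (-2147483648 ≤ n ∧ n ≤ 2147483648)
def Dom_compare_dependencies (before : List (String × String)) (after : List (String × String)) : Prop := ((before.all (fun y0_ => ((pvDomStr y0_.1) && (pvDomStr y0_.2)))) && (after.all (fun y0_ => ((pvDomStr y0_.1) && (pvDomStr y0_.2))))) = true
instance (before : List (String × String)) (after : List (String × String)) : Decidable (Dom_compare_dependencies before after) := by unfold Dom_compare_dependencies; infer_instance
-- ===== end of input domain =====

-- B diffs the two dicts in ONE pass over the sorted union of keys into three buckets instead of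
-- A's three separate set-difference/intersection sorts; same output, a simpler single traversal.

-- ===== PORT A =====
-- three loops: sorted(before-after) removed, sorted(after-before) added, sorted(before&after) changed-if-different
def compare_dependencies (before : List (String × String)) (after : List (String × String)) : List (List (String × Option String)) :=
  let bd := PySem.Dict.ofList before
  let ad := PySem.Dict.ofList after
  let before_keys : PySem.Set String := PySem.Set.ofList bd.keys
  let after_keys : PySem.Set String := PySem.Set.ofList ad.keys
  let changes : List (List (String × Option String)) :=
    (PySem.List.sorted (PySem.Set.diff before_keys after_keys) (fun x => x) false).foldl
      (fun ch name =>
        ch ++ [[("kind", some "removed"), ("name", some name), ("before", bd.get? name), ("after", none)]]) []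
  let changes :=
    (PySem.List.sorted (PySem.Set.diff after_keys before_keys) (fun x => x) false).foldl
      (fun ch name =>
        ch ++ [[("kind", some "added"), ("name", some name), ("before", none), ("after", ad.get? name)]]) changes
  let changes :=
    (PySem.List.sorted (PySem.Set.inter before_keys after_keys) (fun x => x) false).foldl
      (fun ch name =>
        if bd.get? name == ad.get? name then ch
        else ch ++ [[("kind", some "changed"), ("name", some name), ("before", bd.get? name), ("after", ad.get? name)]]) changes
  changes

-- ===== PORT B =====
-- one pass over sorted(set(before) | set(after)) keeping three buckets, concatenated at the end
def compare_dependencies_alt (before : List (String × String)) (after : List (String × String)) : List (List (String × Option String)) :=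
  let bd := PySem.Dict.ofList before
  let ad := PySem.Dict.ofList after
  let buckets :=
    (PySem.List.sorted (PySem.Set.union (PySem.Set.ofList bd.keys) (PySem.Set.ofList ad.keys)) (fun x => x) false).foldl
      (fun (acc : List (List (String × Option String)) × List (List (String × Option String)) × List (List (String × Option String))) name =>
        if !(ad.contains name) then
          (acc.1 ++ [[("kind", some "removed"), ("name", some name), ("before", bd.get? name), ("after", none)]], acc.2.1, acc.2.2)
        else if !(bd.contains name) then
          (acc.1, acc.2.1 ++ [[("kind", some "added"), ("name", some name), ("before", none), ("after", ad.get? name)]], acc.2.2)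
        else if !(bd.get? name == ad.get? name) then
          (acc.1, acc.2.1, acc.2.2 ++ [[("kind", some "changed"), ("name", some name), ("before", bd.get? name), ("after", ad.get? name)]])
        else acc)
      ([], [], [])
  buckets.1 ++ buckets.2.1 ++ buckets.2.2

-- ===== PRECONDITION & SPEC =====
def Spec_compare_dependencies (before : List (String × String)) (after : List (String × String)) (out : List (List (String × Option String))) : Prop := out = compare_dependencies_alt before after
instance (before : List (String × String)) (after : List (String × String)) (out : List (List (String × Option String))) : Decidable (Spec_compare_dependencies before after out) := by unfold Spec_compare_dependencies; infer_instance

-- ===== CLAIM (what is proved, stated in full; the proofs are below) =====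
def Claim_equal_compare_dependencies : Prop := ∀ (before : List (String × String)) (after : List (String × String)), Dom_compare_dependencies before after → Spec_compare_dependencies before after (compare_dependencies before after)

-- ===== LEMMAS AND PROOFS =====

-- B's single loop with three independent append-buckets, characterised as three filters
theorem pvFoldl3 {E : Type} (l : List String) (p1 p2 p3 : String → Bool) (f1 f2 f3 : String → E)
    (r a c : List E) :
    l.foldl (fun (acc : List E × List E × List E) n =>
        if p1 n then (acc.1 ++ [f1 n], acc.2.1, acc.2.2)
        else if p2 n then (acc.1, acc.2.1 ++ [f2 n], acc.2.2)
        else if p3 n then (acc.1, acc.2.1, acc.2.2 ++ [f3 n])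
        else acc) (r, a, c)
    = (r ++ (l.filter p1).map f1,
       a ++ (l.filter (fun n => !p1 n && p2 n)).map f2,
       c ++ (l.filter (fun n => !p1 n && !p2 n && p3 n)).map f3) := by
  induction l generalizing r a c with
  | nil => simp
  | cons x t ih =>
    simp only [List.foldl_cons, List.filter_cons]
    by_cases h1 : p1 x = true
    · simp [h1, ih]
    · by_cases h2 : p2 x = true
      · simp [h1, h2, ih]
      · by_cases h3 : p3 x = true
        · simp [h1, h2, h3, ih]
        · simp [h1, h2, h3, ih]

-- A's third loop skips when the values are equal
theorem pvFoldlSkip {E : Type} (l : List String) (p : String → Bool) (f : String → E) (a : List E) :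
    l.foldl (fun acc n => if p n then acc else acc ++ [f n]) a
    = a ++ (l.filter (fun n => !p n)).map f := by
  induction l generalizing a with
  | nil => simp
  | cons x t ih =>
    simp only [List.foldl_cons, List.filter_cons]
    by_cases h : p x = true
    · simp [h, ih]
    · simp [h, ih]

-- sorted of any Nodup key set equals the matching filter of a strictly increasing list
theorem pvSortedEqFilter (S U : List String) (p : String → Bool)
    (hS : S.Nodup) (hU : U.Pairwise (· < ·))
    (hmem : ∀ n, n ∈ S ↔ n ∈ U ∧ p n = true) :
    PySem.List.sorted S (fun x => x) false = U.filter p := by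
  apply PySem.List.sorted_eq_of_perm_of_pairwise_lt
  · have hUnd : U.Nodup := hU.imp (fun h => ne_of_lt h)
    refine (List.perm_ext_iff_of_nodup (hUnd.filter p) hS).mpr ?_
    intro n
    simp only [List.mem_filter, hmem n]
  · exact List.Pairwise.sublist (List.filter_sublist (p := p) (l := U)) hU

theorem compare_dependencies_eq (before after : List (String × String)) :
    compare_dependencies before after = compare_dependencies_alt before after := by
  unfold compare_dependencies compare_dependencies_alt
  dsimp only
  set bd := PySem.Dict.ofList before with hbd
  set ad := PySem.Dict.ofList after with had
  set kb := bd.keys with hkb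
  set ka := ad.keys with hka
  have hkbN : kb.Nodup := PySem.Dict.nodup_keys_ofList before
  have hkaN : ka.Nodup := PySem.Dict.nodup_keys_ofList after
  have hob : PySem.Set.ofList kb = kb := PySem.Set.ofList_eq_self_of_nodup (xs := kb) hkbN
  have hoa : PySem.Set.ofList ka = ka := PySem.Set.ofList_eq_self_of_nodup (xs := ka) hkaN
  set U := PySem.List.sorted (PySem.Set.union (PySem.Set.ofList kb) (PySem.Set.ofList ka)) (fun x => x) false with hUdef
  have hUmem : ∀ n, n ∈ U ↔ n ∈ kb ∨ n ∈ ka := by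
    intro n
    rw [hUdef, PySem.List.mem_sorted, PySem.Set.mem_union, hob, hoa]
  have hUnodup : (PySem.Set.union (PySem.Set.ofList kb) (PySem.Set.ofList ka)).Nodup := by
    exact PySem.Set.nodup_union _ _ (by rw [hob]; exact hkbN)
  have hUlt : U.Pairwise (· < ·) := by
    have hle : U.Pairwise (fun a b => a ≤ b) := PySem.List.sorted_pairwise (xs := PySem.Set.union (PySem.Set.ofList kb) (PySem.Set.ofList ka)) (key := fun x => x)
    have hne : U.Pairwise (· ≠ ·) := (PySem.List.sorted_perm _ _ _).nodup_iff.mpr hUnodup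
    exact (hle.and hne).imp (fun h => lt_of_le_of_ne h.1 h.2)
  have hcb : ∀ n, bd.contains n = true ↔ n ∈ kb := fun n => PySem.Dict.contains_iff_mem_keys bd n
  have hca : ∀ n, ad.contains n = true ↔ n ∈ ka := fun n => PySem.Dict.contains_iff_mem_keys ad n
  -- the three sorted key lists of A are filters of U
  have h1 : PySem.List.sorted (PySem.Set.diff (PySem.Set.ofList kb) (PySem.Set.ofList ka)) (fun x => x) false
      = U.filter (fun n => !(ad.contains n)) := by
    apply pvSortedEqFilter _ _ _ (PySem.Set.nodup_diff _ _ (by rw [hob]; exact hkbN)) hUlt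
    intro n
    rw [PySem.Set.mem_diff, hob, hoa, hUmem n]
    simp only [Bool.not_eq_true', ← Bool.not_eq_true, hca n]
    tauto
  have h2 : PySem.List.sorted (PySem.Set.diff (PySem.Set.ofList ka) (PySem.Set.ofList kb)) (fun x => x) false
      = U.filter (fun n => !(!(ad.contains n)) && !(bd.contains n)) := by
    apply pvSortedEqFilter _ _ _ (PySem.Set.nodup_diff _ _ (by rw [hoa]; exact hkaN)) hUlt
    intro n
    rw [PySem.Set.mem_diff, hob, hoa, hUmem n]
    simp only [Bool.and_eq_true, Bool.not_not, ← Bool.not_eq_true, Bool.not_eq_true', hca n, hcb n]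
    constructor
    · rintro ⟨hn, hnb⟩; exact ⟨Or.inr hn, hn, by simpa [hcb n] using hnb⟩
    · rintro ⟨_, hn, hnb⟩; exact ⟨hn, by simpa [hcb n] using hnb⟩
  have h3 : PySem.List.sorted (PySem.Set.inter (PySem.Set.ofList kb) (PySem.Set.ofList ka)) (fun x => x) false
      = U.filter (fun n => bd.contains n && ad.contains n) := by
    apply pvSortedEqFilter _ _ _ (PySem.Set.nodup_inter _ _ (by rw [hob]; exact hkbN)) hUlt
    intro n
    rw [PySem.Set.mem_inter, hob, hoa, hUmem n]
    simp only [Bool.and_eq_true, hca n, hcb n]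
    tauto
  rw [pvFoldl3, PySem.List.foldl_append_singleton_eq_map, PySem.List.foldl_append_singleton_eq_map, pvFoldlSkip,
    h1, h2, h3, List.filter_filter]
  simp only [List.nil_append, List.append_assoc]
  congr 2
  refine congrArg _ ?_
  apply List.filter_congr
  intro n _
  cases hb : bd.contains n <;> cases ha : ad.contains n <;> simp

-- ===== VERDICT (by name: the statement is the Claim_ definition above) =====
theorem compare_dependencies_spec : Claim_equal_compare_dependencies := by
  intro before after _
  unfold Spec_compare_dependencies
  exact compare_dependencies_eq before after
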